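-- pv_equiv track=rewrite | github.com/jenicro/bayesian-efa | bayesian_efa.py | _resolve_identification
-- ===== SOURCE A (Python) =====
-- def _resolve_identification(
--     P: int,
--     K: int,
--     identification: str,
--     anchors: list[int] | None,
-- ):
--     """Resolve identification strategy to (diag_idx, free_idx) lists.
--
--     Returns
--     -------
--     diag_idx : list of (row, col) — positivity-constrained entries
--     free_idx : list of (row, col) — unconstrained (shrinkage-prior) entries
--     all other (row, col) positions are structural zeros.
--
--     Strategies
--     ----------
--     - 'lower_triangular' : Geweke-Zhou (1996). Anchors = items 1..K, strict
--       lower-triangular pattern with positive diagonal.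
--     - 'anchor' : Generalized Geweke-Zhou (Aguilar & West 2000). User picks
--       K distinct anchor items. Anchor k has a positive loading on factor k
--       and ZERO loading on factors > k; non-anchor items are fully free.
--     - 'unconstrained' : No structural constraints. All P*K entries are
--       free. Identification is handled by post-hoc varimax + column
--       reordering + sign flipping (see post_process_loadings).
--     """
--     ident = identification.lower()
--     if ident == "lower_triangular":
--         anchors = list(range(K))  # items 0..K-1
--         ident = "anchor"           # fall through to anchor logic
--     if ident == "anchor":
--         if anchors is None:
--             anchors = list(range(K))
--         if len(anchors) != K:
--             raise ValueError(f"need {K} anchors, got {len(anchors)}")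
--         if len(set(anchors)) != K:
--             raise ValueError("anchors must be distinct")
--         if any(a < 0 or a >= P for a in anchors):
--             raise ValueError("anchors must be in [0, P)")
--         anchor_set = set(anchors)
--         anchor_of_col = {k: a for k, a in enumerate(anchors)}
--         diag_idx: list[tuple[int, int]] = []
--         free_idx: list[tuple[int, int]] = []
--         for j in range(P):
--             for k in range(K):
--                 if j == anchor_of_col[k]:
--                     diag_idx.append((j, k))  # positive
--                 elif j in anchor_set:
--                     # j is an anchor for some other factor k' -> structural
--                     # zero on factors > k' to break rotation; free on factors < k'
--                     k_prime = anchors.index(j)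
--                     if k > k_prime:
--                         continue  # structural zero
--                     else:
--                         free_idx.append((j, k))
--                 else:
--                     free_idx.append((j, k))
--         return diag_idx, free_idx
--     if ident == "unconstrained":
--         diag_idx = []
--         free_idx = [(j, k) for j in range(P) for k in range(K)]
--         return diag_idx, free_idx
--     raise ValueError(f"unknown identification: {identification}")
-- ===== SOURCE B (Python) =====
-- def _resolve_identification(
--     P: int,
--     K: int,
--     identification: str,
--     anchors: list[int] | None,
-- ):
--     """Row-driven reformulation: one reverse map anchor_row -> factor_column,
--     then a single pass over rows emitting whole column ranges."""
--     ident = identification.lower()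
--     if ident == "lower_triangular":
--         anchors = list(range(K))
--         ident = "anchor"
--     if ident == "anchor":
--         if anchors is None:
--             anchors = list(range(K))
--         if len(anchors) != K:
--             raise ValueError(f"need {K} anchors, got {len(anchors)}")
--         if len(set(anchors)) != K:
--             raise ValueError("anchors must be distinct")
--         if any(a < 0 or a >= P for a in anchors):
--             raise ValueError("anchors must be in [0, P)")
--         col_of_row = {a: k for k, a in enumerate(anchors)}
--         diag_idx: list[tuple[int, int]] = []
--         free_idx: list[tuple[int, int]] = []
--         for j in range(P):
--             kp = col_of_row.get(j)
--             if kp is None: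
--                 free_idx.extend((j, k) for k in range(K))
--             else:
--                 diag_idx.append((j, kp))
--                 free_idx.extend((j, k) for k in range(kp))
--         return diag_idx, free_idx
--     if ident == "unconstrained":
--         return [], [(j, k) for j in range(P) for k in range(K)]
--     raise ValueError(f"unknown identification: {identification}")
-- ===== Notes on version B (the rewrite author's own statement) =====
-- stated objective: simpler
-- what changed: A scans every (row, column) cell and per cell does a dict lookup, a set membership test and a list.index scan; B builds one reverse map anchor_row -> factor_column and makes a single pass over rows, emitting whole column ranges per row.
import Mathlib
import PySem

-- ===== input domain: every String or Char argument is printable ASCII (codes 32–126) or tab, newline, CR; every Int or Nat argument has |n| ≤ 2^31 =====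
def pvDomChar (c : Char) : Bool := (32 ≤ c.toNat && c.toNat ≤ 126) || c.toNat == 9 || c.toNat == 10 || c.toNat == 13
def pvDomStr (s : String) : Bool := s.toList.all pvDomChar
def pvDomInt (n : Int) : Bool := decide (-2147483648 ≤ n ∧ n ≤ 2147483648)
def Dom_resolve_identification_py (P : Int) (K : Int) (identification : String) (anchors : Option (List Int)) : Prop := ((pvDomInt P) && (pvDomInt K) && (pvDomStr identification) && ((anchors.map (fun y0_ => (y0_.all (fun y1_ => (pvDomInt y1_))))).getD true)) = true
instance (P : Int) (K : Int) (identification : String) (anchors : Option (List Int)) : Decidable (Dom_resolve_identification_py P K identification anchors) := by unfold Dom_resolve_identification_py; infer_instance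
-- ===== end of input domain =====

-- B replaces A's per-cell nested scans (dict lookup + set membership + list.index per cell)
-- by one reverse map anchor_row -> factor_column and a single pass over rows emitting column ranges.

-- ===== PORT A =====
-- inner cell loop of A's anchor branch (the body of 'for k in range(K)')
def pvInnerA (aoc : PySem.Dict Int Int) (aset : PySem.Set Int) (L : List Int)
    (j : Int) (acc : List (Int × Int) × List (Int × Int)) (ks : List Int) :
    List (Int × Int) × List (Int × Int) :=
  ks.foldl (fun acc2 k =>
    if j == aoc.getD k 0 then (acc2.1 ++ [(j, k)], acc2.2)       -- KeyError impossible inside Pre_ (keys are 0..K-1)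
    else if PySem.Set.contains aset j then
      -- k_prime = anchors.index(j); ValueError impossible here since j ∈ anchor_set
      if k > (((PySem.List.index? L j).getD 0 : Nat) : Int) then acc2
      else (acc2.1, acc2.2 ++ [(j, k)])
    else (acc2.1, acc2.2 ++ [(j, k)])) acc

-- anchor_of_col = {k: a for k, a in enumerate(anchors)}
def pvAoc (L : List Int) : PySem.Dict Int Int :=
  (PySem.List.enumerate L 0).foldl (fun d q => d.insert q.1 q.2) PySem.Dict.empty

def resolve_identification_py (P : Int) (K : Int) (identification : String) (anchors : Option (List Int)) : (List (Int × Int)) × (List (Int × Int)) :=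
  let ident0 := PySem.Str.lower identification
  let p := if ident0 == "lower_triangular" then ("anchor", some (PySem.List.pyRange 0 K 1))
           else (ident0, anchors)
  if p.1 == "anchor" then
    let anchors' := p.2.getD (PySem.List.pyRange 0 K 1)
    -- the three validation 'raise ValueError' paths (count/distinctness/range) are excluded by Pre_
    let aset := PySem.Set.ofList anchors'
    let aoc := pvAoc anchors'
    (PySem.List.pyRange 0 P 1).foldl
      (fun acc j => pvInnerA aoc aset anchors' j acc (PySem.List.pyRange 0 K 1)) ([], [])
  else if p.1 == "unconstrained" then
    ([], (PySem.List.pyRange 0 P 1).flatMap (fun j => (PySem.List.pyRange 0 K 1).map (fun k => (j, k))))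
  else ([], [])   -- 'raise ValueError(unknown identification)': excluded by Pre_

-- ===== PORT B =====
-- col_of_row = {a: k for k, a in enumerate(anchors)}
def pvCor (L : List Int) : PySem.Dict Int Int :=
  (PySem.List.enumerate L 0).foldl (fun d q => d.insert q.2 q.1) PySem.Dict.empty

-- body of B's single row loop
def pvRowB (cor : PySem.Dict Int Int) (K : Int)
    (acc : List (Int × Int) × List (Int × Int)) (j : Int) :
    List (Int × Int) × List (Int × Int) :=
  match cor.get? j with
  | none => (acc.1, acc.2 ++ (PySem.List.pyRange 0 K 1).map (fun k => (j, k)))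
  | some kp => (acc.1 ++ [(j, kp)], acc.2 ++ (PySem.List.pyRange 0 kp 1).map (fun k => (j, k)))

def resolve_identification_py_alt (P : Int) (K : Int) (identification : String) (anchors : Option (List Int)) : (List (Int × Int)) × (List (Int × Int)) :=
  let ident0 := PySem.Str.lower identification
  let p := if ident0 == "lower_triangular" then ("anchor", some (PySem.List.pyRange 0 K 1))
           else (ident0, anchors)
  if p.1 == "anchor" then
    let anchors' := p.2.getD (PySem.List.pyRange 0 K 1)
    -- same validation raises as A, excluded by Pre_
    let cor := pvCor anchors'
    (PySem.List.pyRange 0 P 1).foldl (pvRowB cor K) ([], [])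
  else if p.1 == "unconstrained" then
    ([], (PySem.List.pyRange 0 P 1).flatMap (fun j => (PySem.List.pyRange 0 K 1).map (fun k => (j, k))))
  else ([], [])

-- ===== PRECONDITION & SPEC =====
-- Pre_ excludes exactly the inputs on which A raises ValueError: an unknown identification
-- string, and anchor lists (explicit or implied by 'lower_triangular'/None) failing A's own
-- count / distinctness / [0, P) range validation.
def Pre_resolve_identification_py (P : Int) (K : Int) (identification : String) (anchors : Option (List Int)) : Prop :=
  if PySem.Str.lower identification = "lower_triangular" then 0 ≤ K ∧ (K = 0 ∨ K ≤ P)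
  else if PySem.Str.lower identification = "anchor" then
    (if anchors.isNone then 0 ≤ K ∧ (K = 0 ∨ K ≤ P)
     else ((anchors.getD []).length : Int) = K ∧ (anchors.getD []).Nodup ∧ ∀ a ∈ anchors.getD [], 0 ≤ a ∧ a < P)
  else PySem.Str.lower identification = "unconstrained"

instance (P : Int) (K : Int) (identification : String) (anchors : Option (List Int)) : Decidable (Pre_resolve_identification_py P K identification anchors) := by unfold Pre_resolve_identification_py; infer_instance

def pvWitness_resolve_identification_py : Int × Int × String × Option (List Int) := (3, 2, "anchor", some [0, 2])

def Spec_resolve_identification_py (P : Int) (K : Int) (identification : String) (anchors : Option (List Int)) (out : (List (Int × Int)) × (List (Int × Int))) : Prop := out = resolve_identification_py_alt P K identification anchors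
instance (P : Int) (K : Int) (identification : String) (anchors : Option (List Int)) (out : (List (Int × Int)) × (List (Int × Int))) : Decidable (Spec_resolve_identification_py P K identification anchors out) := by unfold Spec_resolve_identification_py; infer_instance

-- ===== CLAIM (what is proved, stated in full; the proofs are below) =====
def Claim_equal_resolve_identification_py : Prop := ∀ (P : Int) (K : Int) (identification : String) (anchors : Option (List Int)), Dom_resolve_identification_py P K identification anchors → Pre_resolve_identification_py P K identification anchors → Spec_resolve_identification_py P K identification anchors (resolve_identification_py P K identification anchors)

-- ===== LEMMAS AND PROOFS =====

theorem pv_witness_ok :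
    Dom_resolve_identification_py (pvWitness_resolve_identification_py.1) (pvWitness_resolve_identification_py.2.1) (pvWitness_resolve_identification_py.2.2.1) (pvWitness_resolve_identification_py.2.2.2) ∧
    Pre_resolve_identification_py (pvWitness_resolve_identification_py.1) (pvWitness_resolve_identification_py.2.1) (pvWitness_resolve_identification_py.2.2.1) (pvWitness_resolve_identification_py.2.2.2) := by
  decide

-- anchor_of_col lookup: key n holds L[n]
theorem pvAoc_getD (L : List Int) (n : Nat) (hn : n < L.length) :
    (pvAoc L).getD (n : Int) 0 = L[n] := by
  have hitems : (pvAoc L).items = PySem.List.enumerate L 0 := by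
    unfold pvAoc
    have h := PySem.Dict.items_foldl_insert_fresh (PySem.List.enumerate L 0)
      (fun q => q.1) (fun q => q.2) (PySem.Dict.empty)
      (by intro a _; simp [PySem.Dict.contains_empty])
      (by rw [PySem.List.map_fst_enumerate]; exact PySem.List.nodup_pyRange_one 0 (0 + L.length))
    simpa using h
  have hkeys : (pvAoc L).keys.Nodup := by
    have : (pvAoc L).keys = PySem.List.pyRange 0 (0 + L.length) 1 := by
      simp [PySem.Dict.keys, hitems, PySem.List.map_fst_enumerate]
    rw [this]; exact PySem.List.nodup_pyRange_one 0 (0 + L.length)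
  have hmem : ((n : Int), L[n]) ∈ (pvAoc L).items := by
    rw [hitems, PySem.List.mem_enumerate_iff]
    exact ⟨n, hn, by simp⟩
  exact PySem.Dict.getD_of_mem_items (pvAoc L) hmem hkeys 0

theorem pvCor_items (L : List Int) (hnd : L.Nodup) :
    (pvCor L).items = (PySem.List.enumerate L 0).map (fun q => (q.2, q.1)) := by
  unfold pvCor
  have h := PySem.Dict.items_foldl_insert_fresh (PySem.List.enumerate L 0)
    (fun q => q.2) (fun q => q.1) (PySem.Dict.empty)
    (by intro a _; simp [PySem.Dict.contains_empty])
    (by rw [PySem.List.map_snd_enumerate]; exact hnd)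
  simpa using h

theorem pvCor_keys (L : List Int) (hnd : L.Nodup) : (pvCor L).keys = L := by
  simp only [PySem.Dict.keys, pvCor_items L hnd, List.map_map]
  have h : ((fun p : Int × Int => p.1) ∘ fun q : Int × Int => (q.2, q.1)) = fun q : Int × Int => q.2 := rfl
  rw [h, PySem.List.map_snd_enumerate]

-- col_of_row misses exactly the non-anchor rows
theorem pvCor_get?_eq_none_iff (L : List Int) (hnd : L.Nodup) (j : Int) :
    (pvCor L).get? j = none ↔ j ∉ L := by
  rw [PySem.Dict.get?_eq_none_iff_not_mem_keys, pvCor_keys L hnd]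

-- a hit in col_of_row names an index of L carrying j
theorem pvCor_get?_eq_some (L : List Int) (hnd : L.Nodup) (j : Int) (kp : Int)
    (h : (pvCor L).get? j = some kp) :
    ∃ (n : Nat) (hn : n < L.length), kp = (n : Int) ∧ L[n] = j := by
  have hk : (pvCor L).keys.Nodup := by rw [pvCor_keys L hnd]; exact hnd
  rw [PySem.Dict.get?_eq_some_iff_mem_items _ _ _ hk, pvCor_items L hnd, List.mem_map] at h
  obtain ⟨q, hq, hq2⟩ := h
  rw [PySem.List.mem_enumerate_iff] at hq
  obtain ⟨n, hn, rfl⟩ := hq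
  have h1 : L[n] = j := congrArg Prod.fst hq2
  have h2 : kp = (n : Int) := by simpa using (congrArg Prod.snd hq2).symm
  exact ⟨n, hn, h2, h1⟩

theorem pv_index?_getElem (L : List Int) (hnd : L.Nodup) (n : Nat) (hn : n < L.length) :
    PySem.List.index? L L[n] = some n := by
  rw [PySem.List.index?_eq_some_iff]
  refine ⟨L.take n, L.drop (n + 1), ?_, ?_, ?_⟩
  · conv_lhs => rw [← List.take_append_drop n L]
    congr 1
    exact (List.getElem_cons_drop hn).symm
  · simp [Nat.min_eq_left (Nat.le_of_lt hn)]
  · intro hmem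
    obtain ⟨i, hi, hig⟩ := List.mem_take_iff_getElem.mp hmem
    have : i = n := (List.Nodup.getElem_inj_iff hnd).mp hig
    omega

theorem pvInnerA_free (aoc : PySem.Dict Int Int) (aset : PySem.Set Int) (L : List Int)
    (j : Int) (ks : List Int) (acc : List (Int × Int) × List (Int × Int))
    (hs : PySem.Set.contains aset j = false)
    (hne : ∀ k ∈ ks, (j == aoc.getD k 0) = false) :
    pvInnerA aoc aset L j acc ks = (acc.1, acc.2 ++ ks.map (fun k => (j, k))) := by
  induction ks generalizing acc with
  | nil => simp [pvInnerA]
  | cons k ks ih =>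
    have h1 := hne k (List.mem_cons_self)
    have step : pvInnerA aoc aset L j acc (k :: ks)
        = pvInnerA aoc aset L j (acc.1, acc.2 ++ [(j, k)]) ks := by
      simp only [pvInnerA, List.foldl_cons, h1, Bool.false_eq_true, if_false, hs]
    rw [step, ih _ (fun k hk => hne k (List.mem_cons_of_mem _ hk))]
    simp

theorem pvInnerA_low (aoc : PySem.Dict Int Int) (aset : PySem.Set Int) (L : List Int)
    (j : Int) (ks : List Int) (acc : List (Int × Int) × List (Int × Int))
    (hs : PySem.Set.contains aset j = true)
    (hk : ∀ k ∈ ks, (j == aoc.getD k 0) = false ∧ ¬ ((((PySem.List.index? L j).getD 0 : Nat) : Int) < k)) :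
    pvInnerA aoc aset L j acc ks = (acc.1, acc.2 ++ ks.map (fun k => (j, k))) := by
  induction ks generalizing acc with
  | nil => simp [pvInnerA]
  | cons k ks ih =>
    obtain ⟨h1, h2⟩ := hk k (List.mem_cons_self)
    have step : pvInnerA aoc aset L j acc (k :: ks)
        = pvInnerA aoc aset L j (acc.1, acc.2 ++ [(j, k)]) ks := by
      simp only [pvInnerA, List.foldl_cons, h1, Bool.false_eq_true, if_false, hs, if_true,
        gt_iff_lt, if_neg h2]
    rw [step, ih _ (fun k hk' => hk k (List.mem_cons_of_mem _ hk'))]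
    simp

theorem pvInnerA_skip (aoc : PySem.Dict Int Int) (aset : PySem.Set Int) (L : List Int)
    (j : Int) (ks : List Int) (acc : List (Int × Int) × List (Int × Int))
    (hs : PySem.Set.contains aset j = true)
    (hk : ∀ k ∈ ks, (j == aoc.getD k 0) = false ∧ (((PySem.List.index? L j).getD 0 : Nat) : Int) < k) :
    pvInnerA aoc aset L j acc ks = acc := by
  induction ks generalizing acc with
  | nil => simp [pvInnerA]
  | cons k ks ih =>
    obtain ⟨h1, h2⟩ := hk k (List.mem_cons_self)
    have step : pvInnerA aoc aset L j acc (k :: ks) = pvInnerA aoc aset L j acc ks := by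
      simp only [pvInnerA, List.foldl_cons, h1, Bool.false_eq_true, if_false, gt_iff_lt,
        if_pos h2, hs, if_true]
    rw [step]
    exact ih _ (fun k hk' => hk k (List.mem_cons_of_mem _ hk'))

theorem pvInnerA_append (aoc : PySem.Dict Int Int) (aset : PySem.Set Int) (L : List Int)
    (j : Int) (l1 l2 : List Int) (acc : List (Int × Int) × List (Int × Int)) :
    pvInnerA aoc aset L j acc (l1 ++ l2) = pvInnerA aoc aset L j (pvInnerA aoc aset L j acc l1) l2 := by
  simp [pvInnerA, List.foldl_append]

theorem pv_contains_iff (L : List Int) (j : Int) :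
    PySem.Set.contains (PySem.Set.ofList L) j = true ↔ j ∈ L := by
  simp [PySem.Set.contains, PySem.Set.mem_ofList]

theorem pvAoc_getD_int (L : List Int) (k : Int) (h0 : 0 ≤ k) (hlen : k < (L.length : Int)) :
    (pvAoc L).getD k 0 = L[k.toNat]'(by omega) := by
  have h := pvAoc_getD L k.toNat (by omega)
  rwa [Int.toNat_of_nonneg h0] at h

-- per-row equality of the two loop bodies
theorem pv_row_eq (L : List Int) (K : Int) (hnd : L.Nodup) (hK : (L.length : Int) = K)
    (acc : List (Int × Int) × List (Int × Int)) (j : Int) :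
    pvInnerA (pvAoc L) (PySem.Set.ofList L) L j acc (PySem.List.pyRange 0 K 1) = pvRowB (pvCor L) K acc j := by
  cases hget : (pvCor L).get? j with
  | none =>
    have hj : j ∉ L := (pvCor_get?_eq_none_iff L hnd j).mp hget
    have hs : PySem.Set.contains (PySem.Set.ofList L) j = false := by
      rw [Bool.eq_false_iff]
      intro h
      exact hj ((pv_contains_iff L j).mp h)
    rw [pvInnerA_free _ _ _ _ _ _ hs ?hne]
    · simp [pvRowB, hget]
    case hne =>
      intro k hkmem
      obtain ⟨hk0, hkK⟩ := PySem.List.mem_pyRange_one.mp hkmem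
      rw [pvAoc_getD_int L k hk0 (by omega), beq_eq_false_iff_ne]
      intro he
      exact hj (he ▸ List.getElem_mem (by omega))
  | some kp =>
    obtain ⟨n, hn, hkp, hLn⟩ := pvCor_get?_eq_some L hnd j kp hget
    subst hkp
    have hidx : PySem.List.index? L j = some n := by
      rw [← hLn]; exact pv_index?_getElem L hnd n hn
    have hjL : j ∈ L := hLn ▸ List.getElem_mem hn
    have hsT : PySem.Set.contains (PySem.Set.ofList L) j = true := (pv_contains_iff L j).mpr hjL
    have hnK : (n : Int) < K := by omega
    have hne_of_ne : ∀ k : Int, 0 ≤ k → k < K → k.toNat ≠ n → (j == (pvAoc L).getD k 0) = false := by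
      intro k hk0 hkK hkn
      rw [pvAoc_getD_int L k hk0 (by omega), beq_eq_false_iff_ne]
      intro he
      exact hkn ((List.Nodup.getElem_inj_iff hnd).mp (by rw [← he, hLn]))
    have hsplit : PySem.List.pyRange 0 K 1
        = PySem.List.pyRange 0 (n : Int) 1 ++ ((n : Int) :: PySem.List.pyRange ((n : Int) + 1) K 1) := by
      rw [PySem.List.pyRange_one_append 0 (n : Int) K (by omega) (le_of_lt hnK),
        PySem.List.pyRange_one_cons hnK]
    have hseg1 : pvInnerA (pvAoc L) (PySem.Set.ofList L) L j acc (PySem.List.pyRange 0 (n : Int) 1)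
        = (acc.1, acc.2 ++ (PySem.List.pyRange 0 (n : Int) 1).map (fun k => (j, k))) := by
      refine pvInnerA_low _ _ _ _ _ _ hsT ?_
      intro k hkmem
      obtain ⟨hk0, hkn⟩ := PySem.List.mem_pyRange_one.mp hkmem
      refine ⟨hne_of_ne k hk0 (by omega) (by omega), ?_⟩
      rw [hidx]
      simp only [Option.getD_some]
      omega
    have hmid : (j == (pvAoc L).getD (n : Int) 0) = true := by
      rw [pvAoc_getD_int L (n : Int) (by omega) (by omega)]
      simp only [Int.toNat_natCast]
      rw [beq_iff_eq]
      exact hLn.symm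
    have hstep : ∀ acc2 : List (Int × Int) × List (Int × Int),
        pvInnerA (pvAoc L) (PySem.Set.ofList L) L j acc2 ((n : Int) :: PySem.List.pyRange ((n : Int) + 1) K 1)
        = pvInnerA (pvAoc L) (PySem.Set.ofList L) L j (acc2.1 ++ [(j, (n : Int))], acc2.2)
            (PySem.List.pyRange ((n : Int) + 1) K 1) := by
      intro acc2
      simp only [pvInnerA, List.foldl_cons, hmid, if_true]
    have hseg3 : ∀ acc3 : List (Int × Int) × List (Int × Int),
        pvInnerA (pvAoc L) (PySem.Set.ofList L) L j acc3 (PySem.List.pyRange ((n : Int) + 1) K 1) = acc3 := by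
      intro acc3
      refine pvInnerA_skip _ _ _ _ _ _ hsT ?_
      intro k hkmem
      obtain ⟨hk0, hkn⟩ := PySem.List.mem_pyRange_one.mp hkmem
      refine ⟨hne_of_ne k (by omega) (by omega) (by omega), ?_⟩
      rw [hidx]
      simp only [Option.getD_some]
      omega
    rw [hsplit, pvInnerA_append, hseg1, hstep, hseg3]
    simp [pvRowB, hget]

theorem pv_anchor_eq (P : Int) (L : List Int) (K : Int) (hnd : L.Nodup) (hK : (L.length : Int) = K) :
    (PySem.List.pyRange 0 P 1).foldl
      (fun acc j => pvInnerA (pvAoc L) (PySem.Set.ofList L) L j acc (PySem.List.pyRange 0 K 1)) ([], [])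
    = (PySem.List.pyRange 0 P 1).foldl (pvRowB (pvCor L) K) ([], []) := by
  exact PySem.List.foldl_congr_mem _ _ _ _ (fun acc j _ => pv_row_eq L K hnd hK acc j)

-- ===== VERDICT (by name: the statement is the Claim_ definition above) =====
theorem pv_main (P K : Int) (identification : String) (anchors : Option (List Int))
    (hpre : Pre_resolve_identification_py P K identification anchors) :
    resolve_identification_py P K identification anchors
      = resolve_identification_py_alt P K identification anchors := by
  unfold resolve_identification_py resolve_identification_py_alt
  unfold Pre_resolve_identification_py at hpre
  by_cases hlt : PySem.Str.lower identification = "lower_triangular"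
  · rw [if_pos hlt] at hpre
    have hKlen : ((PySem.List.pyRange 0 K 1).length : Int) = K := by
      rw [PySem.List.length_pyRange_one]; omega
    simp only [hlt, beq_self_eq_true, if_true, Option.getD_some]
    exact pv_anchor_eq P (PySem.List.pyRange 0 K 1) K (PySem.List.nodup_pyRange_one 0 K) hKlen
  · rw [if_neg hlt] at hpre
    have hlt' : (PySem.Str.lower identification == "lower_triangular") = false := by
      rw [beq_eq_false_iff_ne]; exact hlt
    simp only [hlt', Bool.false_eq_true, if_false]
    by_cases han : PySem.Str.lower identification = "anchor"
    · rw [if_pos han] at hpre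
      have han' : (PySem.Str.lower identification == "anchor") = true := by
        rw [beq_iff_eq]; exact han
      simp only [han', if_true]
      cases anchors with
      | none =>
        simp only [Option.isNone_none, if_true] at hpre
        have hKlen : ((PySem.List.pyRange 0 K 1).length : Int) = K := by
          rw [PySem.List.length_pyRange_one]; omega
        simp only [Option.getD_none]
        exact pv_anchor_eq P (PySem.List.pyRange 0 K 1) K (PySem.List.nodup_pyRange_one 0 K) hKlen
      | some L =>
        simp only [Option.isNone_some, Bool.false_eq_true, if_false, Option.getD_some] at hpre ⊢
        exact pv_anchor_eq P L K hpre.2.1 hpre.1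
    · rw [if_neg han] at hpre
      have han' : (PySem.Str.lower identification == "anchor") = false := by
        rw [beq_eq_false_iff_ne]; exact han
      simp only [han', Bool.false_eq_true, if_false]

theorem resolve_identification_py_spec : Claim_equal_resolve_identification_py := by
  intro P K identification anchors _ hpre
  unfold Spec_resolve_identification_py
  exact pv_main P K identification anchors hpre
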